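-- pv_equiv track=rewrite | github.com/micr0cuts/challenges | advent-of-code-2016/day01.py | update_visited
-- ===== SOURCE A (Python) =====
-- def update_visited(current, xory, sign, n):
--     assert xory in ['x', 'y']
--     assert sign in ['+', '-']
--     passed_blocks = []
--     for step in range(1, n+1):
--         if xory == 'x':
--             newx = current[0] + int(sign + str(step))
--             passed_blocks.append((newx, current[1]))
--         else:
--             newy = current[1] + int(sign + str(step))
--             passed_blocks.append((current[0], newy))
--     return passed_blocks
-- ===== SOURCE B (Python) =====
-- def update_visited(current, xory, sign, n):
--     assert xory in ['x', 'y']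
--     assert sign in ['+', '-']
--     d = 1 if sign == '+' else -1
--     base = current[0] if xory == 'x' else current[1]
--     # stage 1: build the moving-axis coordinates BACK-TO-FRONT (farthest first)
--     coords = []
--     k = n
--     while k >= 1:
--         coords.append(base + d * k)
--         k -= 1
--     coords.reverse()
--     # stage 2: pair each coordinate with the fixed one
--     if xory == 'x':
--         return [(c, current[1]) for c in coords]
--     return [(current[0], c) for c in coords]
-- ===== Notes on version B (the rewrite author's own statement) =====
-- stated objective: alternative
-- what changed: B is staged: it first builds the moving-axis coordinates back-to-front (farthest block first, closed-form base+d*k, no string parsing), reverses once, then a separate mapping pass pairs them with the fixed coordinate, instead of A's single forward loop that reparses int(sign+str(step)) and appends tuples directly.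
import Mathlib
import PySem

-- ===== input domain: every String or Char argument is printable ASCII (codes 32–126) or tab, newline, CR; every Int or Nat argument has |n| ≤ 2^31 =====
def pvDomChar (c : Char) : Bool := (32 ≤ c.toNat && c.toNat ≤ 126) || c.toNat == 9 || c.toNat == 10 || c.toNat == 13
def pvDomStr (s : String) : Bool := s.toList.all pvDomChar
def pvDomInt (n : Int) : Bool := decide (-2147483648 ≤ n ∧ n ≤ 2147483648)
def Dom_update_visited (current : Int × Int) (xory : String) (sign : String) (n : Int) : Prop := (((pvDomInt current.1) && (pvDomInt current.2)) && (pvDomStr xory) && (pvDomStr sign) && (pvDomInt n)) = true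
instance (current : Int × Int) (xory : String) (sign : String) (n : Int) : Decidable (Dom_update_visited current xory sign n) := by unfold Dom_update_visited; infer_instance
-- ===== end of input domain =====

-- B builds the moving-axis coordinates back-to-front (closed-form base+d*k), reverses once, then a second pass pairs them with the fixed coordinate (alternative staged decomposition, same cost).


-- ===== PORT A =====
-- int(sign + str(step)) for sign ∈ {"+","-"} (guaranteed by A's asserts, carried in Pre_)
-- and step ≥ 1: exact on that domain (Python parses '+k' as k and '-k' as -k).
def pySignedInt (sign : String) (step : Int) : Int :=
  if sign = "+" then step else -step

def update_visited (current : Int × Int) (xory : String) (sign : String) (n : Int) : List (Int × Int) :=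
  (PySem.List.pyRange 1 (n + 1) 1).foldl
    (fun passed_blocks step =>
      if xory = "x" then
        passed_blocks ++ [(current.1 + pySignedInt sign step, current.2)]
      else
        passed_blocks ++ [(current.1, current.2 + pySignedInt sign step)])
    []

-- ===== PORT B =====
-- stage 1 of Source B: the while-loop k = n, n-1, …, 1 appending base + d*k (fuel = n.toNat)
def descCoords (base d : Int) : Nat → Int → List Int
  | 0, _ => []
  | Nat.succ m, k => (base + d * k) :: descCoords base d m (k - 1)

def update_visited_alt (current : Int × Int) (xory : String) (sign : String) (n : Int) : List (Int × Int) :=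
  let d : Int := if sign = "+" then 1 else -1
  let base := if xory = "x" then current.1 else current.2
  let coords := (descCoords base d n.toNat n).reverse
  if xory = "x" then coords.map (fun c => (c, current.2))
  else coords.map (fun c => (current.1, c))

-- ===== PRECONDITION & SPEC =====
-- Pre_ excludes exactly the inputs on which A's (and B's) asserts raise AssertionError.
def Pre_update_visited (current : Int × Int) (xory : String) (sign : String) (n : Int) : Prop :=
  (xory = "x" ∨ xory = "y") ∧ (sign = "+" ∨ sign = "-")
instance (current : Int × Int) (xory : String) (sign : String) (n : Int) : Decidable (Pre_update_visited current xory sign n) := by unfold Pre_update_visited; infer_instance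

def pvWitness_update_visited : (Int × Int) × String × String × Int := ((2, -3), "x", "+", 3)

def Spec_update_visited (current : Int × Int) (xory : String) (sign : String) (n : Int) (out : List (Int × Int)) : Prop := out = update_visited_alt current xory sign n
instance (current : Int × Int) (xory : String) (sign : String) (n : Int) (out : List (Int × Int)) : Decidable (Spec_update_visited current xory sign n out) := by unfold Spec_update_visited; infer_instance

-- ===== CLAIM =====
def Claim_equal_update_visited : Prop := ∀ (current : Int × Int) (xory : String) (sign : String) (n : Int), Dom_update_visited current xory sign n → Pre_update_visited current xory sign n → Spec_update_visited current xory sign n (update_visited current xory sign n)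

-- ===== LEMMAS AND PROOFS =====
-- the back-to-front build, reversed, is the ascending list of offsets 1..m
theorem descCoords_reverse (base d : Int) (m : Nat) :
    (descCoords base d m (m : Int)).reverse
      = (List.range m).map (fun i : Nat => base + d * ((i : Int) + 1)) := by
  induction m with
  | zero => simp [descCoords]
  | succ m ih =>
      have hk : ((m : Int) + 1) - 1 = (m : Int) := by ring
      rw [List.range_succ, List.map_append]
      simp only [descCoords, Nat.cast_succ, hk, List.reverse_cons, ih, List.map_cons,
        List.map_nil]

-- A's foldl over pyRange 1 (n+1) as a map over range n.toNat
theorem updA_map (current : Int × Int) (xory sign : String) (n : Int) :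
    update_visited current xory sign n
      = (List.range n.toNat).map (fun i : Nat =>
          if xory = "x" then (current.1 + pySignedInt sign (1 + (i : Int)), current.2)
          else (current.1, current.2 + pySignedInt sign (1 + (i : Int)))) := by
  unfold update_visited
  rw [PySem.List.pyRange_one]
  have hn : (n + 1 - 1).toNat = n.toNat := by omega
  rw [hn]
  have : ∀ (l : List Int) (acc : List (Int × Int)),
      l.foldl (fun passed_blocks step =>
        if xory = "x" then passed_blocks ++ [(current.1 + pySignedInt sign step, current.2)]
        else passed_blocks ++ [(current.1, current.2 + pySignedInt sign step)]) acc
      = acc ++ l.map (fun step =>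
          if xory = "x" then (current.1 + pySignedInt sign step, current.2)
          else (current.1, current.2 + pySignedInt sign step)) := by
    intro l
    induction l with
    | nil => intro acc; simp
    | cons x xs ih =>
        intro acc
        by_cases hx : xory = "x" <;> simp [List.foldl_cons, hx] at * <;> simp [ih]
  rw [this, List.nil_append, List.map_map]
  rfl

-- ===== VERDICT =====
theorem update_visited_spec : Claim_equal_update_visited := by
  intro current xory sign n _ hpre
  obtain ⟨hx, hs⟩ := hpre
  unfold Spec_update_visited update_visited_alt
  rw [updA_map]
  have hd : ∀ s : Int, pySignedInt sign s = (if sign = "+" then (1 : Int) else -1) * s := by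
    intro s
    rcases hs with hs | hs <;> subst hs <;> simp [pySignedInt]
  have hcast : ∀ b : Int, descCoords b (if sign = "+" then 1 else -1) n.toNat n
      = descCoords b (if sign = "+" then 1 else -1) n.toNat (n.toNat : Int) := by
    intro b
    by_cases h : n ≤ 0
    · have h0 : n.toNat = 0 := by omega
      simp [h0, descCoords]
    · congr 1; omega
  rcases hx with hx | hx <;> subst hx <;>
    simp only [reduceIte, String.reduceEq] <;>
    rw [hcast, descCoords_reverse, List.map_map] <;>
    refine List.map_congr_left (fun i _ => ?_) <;>
    simp only [Function.comp_apply, hd, Prod.mk.injEq] <;>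
    refine ⟨?_, ?_⟩ <;> first | trivial | rw [Int.add_comm 1 (i : Int)]
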